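-- pv_equiv track=rewrite | github.com/Kcruz24/AlgoExpert-Python | Medium/MinimumPassesOfMatrix/minimumPassesOfMatrix.py | convert_negatives
-- ===== SOURCE A (Python) =====
-- from collections import deque
--
-- def convert_negatives(matrix):
--     next_pass_queue = deque(get_all_positive_positions(matrix))
--
--     passes = -1
--
--     while len(next_pass_queue) > 0:
--         curr_pass_queue = deque(next_pass_queue)
--         next_pass_queue = []
--
--         while len(curr_pass_queue) > 0:
--             curr_row, curr_col = curr_pass_queue.popleft()
--
--             neighbors = get_neighbors(curr_row, curr_col, matrix)
--
--             for row, col in neighbors: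
--                 value = matrix[row][col]
--                 if value < 0:
--                     matrix[row][col] *= -1
--                     next_pass_queue.append([row, col])
--
--         passes += 1
--
--     return passes
--
-- def get_all_positive_positions(matrix):
--     positive_positions = []
--
--     for row in range(len(matrix)):
--         for col in range(len(matrix[0])):
--             if matrix[row][col] > 0:
--                 positive_positions.append([row, col])
--
--     return positive_positions
--
-- def get_neighbors(row, col, matrix):
--     stack = []
--
--     row_length = len(matrix)
--     col_length = len(matrix[0])
--
--     if row - 1 >= 0:  # UP
--         stack.append([row - 1, col])
--     if row + 1 < row_length:
--         stack.append([row + 1, col])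
--     if col - 1 >= 0:
--         stack.append([row, col - 1])
--     if col + 1 < col_length:
--         stack.append([row, col + 1])
--
--     return stack
-- ===== SOURCE B (Python) =====
-- def convert_negatives(matrix):
--     rows = len(matrix)
--     width = len(matrix[0]) if rows else 0
--     if not any(matrix[r][c] > 0 for r in range(rows) for c in range(width)):
--         return -1
--     passes = 0
--     while True:
--         to_flip = [(r, c) for r in range(rows) for c in range(width)
--                    if matrix[r][c] < 0 and has_positive_neighbor(matrix, r, c, rows, width)]
--         if not to_flip:
--             return passes
--         for r, c in to_flip:
--             matrix[r][c] *= -1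
--         passes += 1
--
-- def has_positive_neighbor(matrix, r, c, rows, width):
--     return ((r > 0 and matrix[r - 1][c] > 0)
--             or (r + 1 < rows and matrix[r + 1][c] > 0)
--             or (c > 0 and matrix[r][c - 1] > 0)
--             or (c + 1 < width and matrix[r][c + 1] > 0))
-- ===== Notes on version B (the rewrite author's own statement) =====
-- stated objective: alternative
-- what changed: Replaces A's two-queue BFS (seed positions, per-pass frontier queues, neighbor-list helper) by a queue-free synchronous fixpoint iteration: each round rescans the whole matrix, collects every negative cell with a positive neighbor, flips them all at once, and counts rounds until no flip occurs; each round's flip set equals one BFS level, so the round count equals A's pass count.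
import Mathlib
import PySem

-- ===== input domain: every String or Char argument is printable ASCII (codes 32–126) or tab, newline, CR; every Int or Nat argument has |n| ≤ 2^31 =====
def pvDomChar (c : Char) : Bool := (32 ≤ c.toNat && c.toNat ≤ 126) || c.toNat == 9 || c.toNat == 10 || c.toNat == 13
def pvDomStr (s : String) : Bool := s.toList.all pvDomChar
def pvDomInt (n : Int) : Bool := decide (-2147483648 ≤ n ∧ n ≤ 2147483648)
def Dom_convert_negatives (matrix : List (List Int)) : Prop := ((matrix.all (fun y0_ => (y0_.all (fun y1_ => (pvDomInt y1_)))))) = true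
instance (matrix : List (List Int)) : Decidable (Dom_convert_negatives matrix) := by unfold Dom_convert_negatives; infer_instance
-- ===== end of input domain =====

-- B replaces A's two-queue BFS over flipped positions by a queue-free synchronous
-- fixpoint iteration (rescan the whole matrix each round, flip every negative cell
-- with a positive neighbour, count rounds); both mutate the matrix in place in the
-- same way and the equivalence proved here is about the return value.

-- shared cell primitives (both ports index the matrix the same way)
def getCell (m : List (List Int)) (r c : Nat) : Int := (m.getD r []).getD c 0

def setCell (m : List (List Int)) (r c : Nat) (v : Int) : List (List Int) :=
  m.set r ((m.getD r []).set c v)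

-- number of negative cells; termination measure of both loops
def negCount (m : List (List Int)) : Nat :=
  (m.map (fun row => row.countP (fun x => decide (x < 0)))).sum

theorem countP_set_int (p : Int → Bool) (row : List Int) :
    ∀ (c : Nat) (v : Int), c < row.length →
    (row.set c v).countP p + (if p (row.getD c 0) then 1 else 0)
      = row.countP p + (if p v then 1 else 0) := by
  induction row with
  | nil => intro c v h; simp at h
  | cons a t ih =>
    intro c v h
    cases c with
    | zero => simp [List.countP_cons]; split_ifs <;> omega
    | succ c' =>
      simp only [List.set_cons_succ, List.countP_cons, List.getD_cons_succ]
      have := ih c' v (by simpa using h)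
      split_ifs at this ⊢ <;> omega

theorem negCount_flip : ∀ (m : List (List Int)) (r c : Nat),
    getCell m r c < 0 →
    negCount (setCell m r c (-(getCell m r c))) + 1 = negCount m := by
  intro m
  induction m with
  | nil => intro r c h; simp [getCell] at h
  | cons row rest ih =>
    intro r c h
    cases r with
    | zero =>
      have h0 : getCell (row :: rest) 0 c = row.getD c 0 := rfl
      rw [h0] at h
      have hc : c < row.length := by
        by_contra hge
        rw [List.getD_eq_default _ _ (by omega)] at h
        omega
      have hcount := countP_set_int (fun x => decide (x < 0)) row c (-(row.getD c 0)) hc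
      have hset : setCell (row :: rest) 0 c (-(getCell (row :: rest) 0 c))
          = (row.set c (-(row.getD c 0))) :: rest := rfl
      rw [hset]
      simp only [negCount, List.map_cons, List.sum_cons]
      have h1 : (decide (row.getD c 0 < 0)) = true := decide_eq_true h
      have h2 : (decide (-(row.getD c 0) < 0)) = false := decide_eq_false (by omega)
      simp only [h1, h2, if_true, Bool.false_eq_true, if_false] at hcount
      omega
    | succ r' =>
      have h' : getCell rest r' c < 0 := h
      have hrec := ih r' c h'
      have hset : setCell (row :: rest) (r' + 1) c (-(getCell (row :: rest) (r' + 1) c))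
          = row :: setCell rest r' c (-(getCell rest r' c)) := rfl
      rw [hset]
      simp only [negCount, List.map_cons, List.sum_cons] at hrec ⊢
      omega

-- ===== PORT A =====
def get_all_positive_positions (m : List (List Int)) : List (Nat × Nat) :=
  (List.range m.length).foldl (fun acc r =>
    (List.range (m.headD []).length).foldl (fun acc2 c =>
      if getCell m r c > 0 then acc2 ++ [(r, c)] else acc2) acc) []

def get_neighbors (r c : Nat) (m : List (List Int)) : List (Nat × Nat) :=
  ((if 1 ≤ r then [(r - 1, c)] else []) ++ (if r + 1 < m.length then [(r + 1, c)] else [])) ++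
  ((if 1 ≤ c then [(r, c - 1)] else []) ++ (if c + 1 < (m.headD []).length then [(r, c + 1)] else []))

-- body of A's inner `for row, col in neighbors` loop (flip negative cell, record it)
def flipFold (st : List (List Int) × List (Nat × Nat)) (rc : Nat × Nat) :
    List (List Int) × List (Nat × Nat) :=
  if getCell st.1 rc.1 rc.2 < 0 then
    (setCell st.1 rc.1 rc.2 (-(getCell st.1 rc.1 rc.2)), st.2 ++ [rc])
  else st

-- A's inner `while len(curr_pass_queue) > 0` loop
def innerA : List (List Int) → List (Nat × Nat) → List (Nat × Nat) →
    List (List Int) × List (Nat × Nat)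
  | m, [], next => (m, next)
  | m, (r, c) :: rest, next =>
    let st := (get_neighbors r c m).foldl flipFold (m, next)
    innerA st.1 rest st.2

theorem flipFold_measure (st : List (List Int) × List (Nat × Nat)) (rc : Nat × Nat) :
    negCount (flipFold st rc).1 + (flipFold st rc).2.length
      = negCount st.1 + st.2.length := by
  unfold flipFold
  split_ifs with h
  · have := negCount_flip st.1 rc.1 rc.2 h
    simp only [List.length_append, List.length_cons, List.length_nil]
    omega
  · rfl

theorem foldl_flipFold_measure (ns : List (Nat × Nat)) :
    ∀ st : List (List Int) × List (Nat × Nat),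
    negCount ((ns.foldl flipFold st).1) + (ns.foldl flipFold st).2.length
      = negCount st.1 + st.2.length := by
  induction ns with
  | nil => intro st; rfl
  | cons p t ih => intro st; rw [List.foldl_cons, ih, flipFold_measure]

theorem innerA_measure : ∀ (cur : List (Nat × Nat)) (m : List (List Int)) (next : List (Nat × Nat)),
    negCount (innerA m cur next).1 + (innerA m cur next).2.length
      = negCount m + next.length := by
  intro cur
  induction cur with
  | nil => intro m next; rfl
  | cons p t ih =>
    intro m next
    obtain ⟨r, c⟩ := p
    simp only [innerA]
    rw [ih, foldl_flipFold_measure]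

-- A's outer `while len(next_pass_queue) > 0` loop
def outerA (m : List (List Int)) (next : List (Nat × Nat)) (passes : Int) : Int :=
  match next with
  | [] => passes
  | _ :: _ =>
    let st := innerA m next []
    outerA st.1 st.2 (passes + 1)
termination_by negCount m + next.length
decreasing_by
  simp only [List.length_cons]
  have h := innerA_measure next m []
  simp only [List.length_nil] at h
  omega

def convert_negatives (matrix : List (List Int)) : Int :=
  outerA matrix (get_all_positive_positions matrix) (-1)

-- ===== PORT B =====
-- `has_positive_neighbor(matrix, r, c, rows, width)`
def hasPosNbr (m : List (List Int)) (r c rows width : Nat) : Bool :=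
  (decide (0 < r) && decide (0 < getCell m (r - 1) c)) ||
  (decide (r + 1 < rows) && decide (0 < getCell m (r + 1) c)) ||
  (decide (0 < c) && decide (0 < getCell m r (c - 1))) ||
  (decide (c + 1 < width) && decide (0 < getCell m r (c + 1)))

-- the `to_flip` comprehension of one round
def toFlip (m : List (List Int)) (rows width : Nat) : List (Nat × Nat) :=
  (List.range rows).flatMap (fun r =>
    ((List.range width).filter (fun c =>
      decide (getCell m r c < 0) && hasPosNbr m r c rows width)).map (fun c => (r, c)))

-- the `for r, c in to_flip: matrix[r][c] *= -1` loop
def flipAll (m : List (List Int)) (S : List (Nat × Nat)) : List (List Int) :=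
  S.foldl (fun mm rc => setCell mm rc.1 rc.2 (-(getCell mm rc.1 rc.2))) m

theorem getD_set {α : Type} (l : List α) :
    ∀ (i j : Nat) (v d : α), (l.set i v).getD j d
      = if i = j ∧ i < l.length then v else l.getD j d := by
  induction l with
  | nil => intro i j v d; simp
  | cons a t ih =>
    intro i j v d
    cases i with
    | zero =>
      cases j with
      | zero => simp
      | succ j' => simp
    | succ i' =>
      cases j with
      | zero => simp
      | succ j' =>
        simp only [List.set_cons_succ, List.getD_cons_succ, List.length_cons]
        rw [ih]
        split_ifs <;> first | rfl | omega

theorem getCell_setCell_ne (m : List (List Int)) (r c : Nat) (v : Int) (r' c' : Nat)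
    (h : ¬(r' = r ∧ c' = c)) : getCell (setCell m r c v) r' c' = getCell m r' c' := by
  unfold getCell setCell
  rw [getD_set]
  split_ifs with hr
  · obtain ⟨hre, _⟩ := hr
    subst hre
    rw [getD_set]
    split_ifs with hc
    · exact absurd ⟨rfl, hc.1.symm⟩ h
    · rfl
  · rfl

theorem mem_toFlip (m : List (List Int)) (rows width : Nat) (x : Nat × Nat) :
    x ∈ toFlip m rows width ↔
      x.1 < rows ∧ x.2 < width ∧ getCell m x.1 x.2 < 0
        ∧ hasPosNbr m x.1 x.2 rows width = true := by
  obtain ⟨r, c⟩ := x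
  simp only [toFlip, List.mem_flatMap, List.mem_map, List.mem_filter, List.mem_range,
    Bool.and_eq_true, decide_eq_true_eq, Prod.mk.injEq]
  constructor
  · rintro ⟨r', hr', c', ⟨⟨hc', hneg, hpos⟩, rfl, rfl⟩⟩
    exact ⟨hr', hc', hneg, hpos⟩
  · rintro ⟨hr, hc, hneg, hpos⟩
    exact ⟨r, hr, c, ⟨⟨hc, hneg, hpos⟩, rfl, rfl⟩⟩

theorem nodup_flatMap_fst (l : List Nat) (f : Nat → List (Nat × Nat)) (hl : l.Nodup)
    (hf : ∀ a, (f a).Nodup) (hkey : ∀ a x, x ∈ f a → x.1 = a) : (l.flatMap f).Nodup := by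
  induction l with
  | nil => simp
  | cons a t ih =>
    rw [List.flatMap_cons]
    refine (hf a).append (ih (List.nodup_cons.1 hl).2) ?_
    intro x hx hx'
    rw [List.mem_flatMap] at hx'
    obtain ⟨b, hb, hxb⟩ := hx'
    have ha := hkey a x hx
    have hbk := hkey b x hxb
    have hab : a = b := by rw [← ha, hbk]
    exact (List.nodup_cons.1 hl).1 (hab ▸ hb)

theorem toFlip_nodup (m : List (List Int)) (rows width : Nat) : (toFlip m rows width).Nodup := by
  refine nodup_flatMap_fst _ _ (List.nodup_range) ?_ ?_
  · intro a
    exact ((List.nodup_range).filter _).map (fun c c' h => by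
      simpa using congrArg Prod.snd h)
  · intro a x hx
    simp only [List.mem_map] at hx
    obtain ⟨c, _, rfl⟩ := hx
    rfl

theorem toFlip_neg (m : List (List Int)) (rows width : Nat) :
    ∀ x ∈ toFlip m rows width, getCell m x.1 x.2 < 0 := by
  intro x hx
  exact ((mem_toFlip m rows width x).1 hx).2.2.1

theorem flipAll_measure : ∀ (S : List (Nat × Nat)) (m : List (List Int)), S.Nodup →
    (∀ x ∈ S, getCell m x.1 x.2 < 0) →
    negCount (flipAll m S) + S.length = negCount m := by
  intro S
  induction S with
  | nil => intro m _ _; rfl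
  | cons x t ih =>
    intro m hnd hneg
    have hx := hneg x List.mem_cons_self
    have hflip := negCount_flip m x.1 x.2 hx
    have hstep : flipAll m (x :: t) = flipAll (setCell m x.1 x.2 (-(getCell m x.1 x.2))) t := rfl
    rw [hstep]
    have htail : ∀ y ∈ t, getCell (setCell m x.1 x.2 (-(getCell m x.1 x.2))) y.1 y.2 < 0 := by
      intro y hy
      rw [getCell_setCell_ne]
      · exact hneg y (List.mem_cons_of_mem _ hy)
      · intro ⟨h1, h2⟩
        exact (List.nodup_cons.1 hnd).1 (by
          have : y = x := Prod.ext h1 h2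
          rw [← this]; exact hy)
    have := ih (setCell m x.1 x.2 (-(getCell m x.1 x.2))) (List.nodup_cons.1 hnd).2 htail
    simp only [List.length_cons]
    omega

-- B's `while True` loop
def loopB (rows width : Nat) (m : List (List Int)) (passes : Int) : Int :=
  if toFlip m rows width = [] then passes
  else loopB rows width (flipAll m (toFlip m rows width)) (passes + 1)
termination_by negCount m
decreasing_by
  have h := flipAll_measure (toFlip m rows width) m (toFlip_nodup m rows width)
    (toFlip_neg m rows width)
  have hlen : 0 < (toFlip m rows width).length := List.length_pos_of_ne_nil (by assumption)
  omega

def convert_negatives_alt (matrix : List (List Int)) : Int :=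
  let rows := matrix.length
  let width := (matrix.headD []).length
  if (List.range rows).any (fun r => (List.range width).any (fun c =>
      decide (0 < getCell matrix r c))) then
    loopB rows width matrix 0
  else -1

-- ===== PRECONDITION & SPEC =====
-- Pre_ excludes ragged matrices having a row shorter than row 0: there the Python A
-- raises IndexError while scanning for positive cells (and the Python B raises too).
def Pre_convert_negatives (matrix : List (List Int)) : Prop :=
  ∀ row ∈ matrix, (matrix.headD []).length ≤ row.length
instance (matrix : List (List Int)) : Decidable (Pre_convert_negatives matrix) := by
  unfold Pre_convert_negatives; infer_instance

def pvWitness_convert_negatives : List (List Int) := [[0, -1], [2, -3]]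

def Spec_convert_negatives (matrix : List (List Int)) (out : Int) : Prop := out = convert_negatives_alt matrix
instance (matrix : List (List Int)) (out : Int) : Decidable (Spec_convert_negatives matrix out) := by unfold Spec_convert_negatives; infer_instance

-- ===== CLAIM (what is proved, stated in full; the proofs are below) =====
def Claim_equal_convert_negatives : Prop := ∀ (matrix : List (List Int)), Dom_convert_negatives matrix → Pre_convert_negatives matrix → Spec_convert_negatives matrix (convert_negatives matrix)

-- ===== LEMMAS AND PROOFS =====

-- symmetric in-bounds adjacency of two cells
def Adj (rows width : Nat) (x y : Nat × Nat) : Prop :=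
  x.1 < rows ∧ x.2 < width ∧ y.1 < rows ∧ y.2 < width ∧
  ((y.1 + 1 = x.1 ∧ y.2 = x.2) ∨ (x.1 + 1 = y.1 ∧ y.2 = x.2) ∨
   (y.2 + 1 = x.2 ∧ y.1 = x.1) ∨ (x.2 + 1 = y.2 ∧ y.1 = x.1))

theorem Adj_symm (rows width : Nat) (x y : Nat × Nat) (h : Adj rows width x y) :
    Adj rows width y x := by
  unfold Adj at *
  omega

theorem mem_get_neighbors (m : List (List Int)) (x y : Nat × Nat)
    (hx1 : x.1 < m.length) (hx2 : x.2 < (m.headD []).length) :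
    y ∈ get_neighbors x.1 x.2 m ↔ Adj m.length (m.headD []).length x y := by
  obtain ⟨r, c⟩ := x
  obtain ⟨r', c'⟩ := y
  simp only [get_neighbors, List.mem_append, Adj]
  constructor
  · intro h
    rcases h with (h | h) | (h | h) <;>
      · split_ifs at h <;> simp_all <;> omega
  · rintro ⟨_, _, hr', hc', h4⟩
    rcases h4 with ⟨h1, h2⟩ | ⟨h1, h2⟩ | ⟨h1, h2⟩ | ⟨h1, h2⟩
    · left; left; rw [if_pos (by omega)]; simp; omega
    · left; right; rw [if_pos (by omega)]; simp; omega
    · right; left; rw [if_pos (by omega)]; simp; omega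
    · right; right; rw [if_pos (by omega)]; simp; omega

theorem hasPosNbr_iff (m : List (List Int)) (r c rows width : Nat)
    (hr : r < rows) (hc : c < width) :
    hasPosNbr m r c rows width = true ↔
      ∃ y : Nat × Nat, Adj rows width (r, c) y ∧ 0 < getCell m y.1 y.2 := by
  simp only [hasPosNbr, Bool.or_eq_true, Bool.and_eq_true, decide_eq_true_eq]
  constructor
  · intro h
    rcases h with ((⟨h1, h2⟩ | ⟨h1, h2⟩) | ⟨h1, h2⟩) | ⟨h1, h2⟩
    · refine ⟨(r - 1, c), ?_, h2⟩
      exact ⟨hr, hc, by omega, hc, Or.inl ⟨by omega, rfl⟩⟩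
    · refine ⟨(r + 1, c), ?_, h2⟩
      exact ⟨hr, hc, h1, hc, Or.inr (Or.inl ⟨rfl, rfl⟩)⟩
    · refine ⟨(r, c - 1), ?_, h2⟩
      exact ⟨hr, hc, hr, by omega, Or.inr (Or.inr (Or.inl ⟨by omega, rfl⟩))⟩
    · refine ⟨(r, c + 1), ?_, h2⟩
      exact ⟨hr, hc, hr, h1, Or.inr (Or.inr (Or.inr ⟨rfl, rfl⟩))⟩
  · rintro ⟨⟨y1, y2⟩, hadj, hpos⟩
    obtain ⟨_, _, hy1, hy2, h4⟩ := hadj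
    simp only at hpos hy1 hy2
    rcases h4 with ⟨h1, h2⟩ | ⟨h1, h2⟩ | ⟨h1, h2⟩ | ⟨h1, h2⟩ <;> simp only at h1 h2
    · refine Or.inl (Or.inl (Or.inl ⟨by omega, ?_⟩))
      have he : r - 1 = y1 := by omega
      rw [he, ← h2]; exact hpos
    · refine Or.inl (Or.inl (Or.inr ⟨by omega, ?_⟩))
      have he : r + 1 = y1 := by omega
      rw [he, ← h2]; exact hpos
    · refine Or.inl (Or.inr ⟨by omega, ?_⟩)
      have he : c - 1 = y2 := by omega
      rw [he, ← h2]; exact hpos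
    · refine Or.inr ⟨by omega, ?_⟩
      have he : c + 1 = y2 := by omega
      rw [he, ← h2]; exact hpos

theorem neg_inbounds (m : List (List Int)) (r c : Nat) (h : getCell m r c < 0) :
    r < m.length ∧ c < (m.getD r []).length := by
  unfold getCell at h
  have h1 : r < m.length := by
    by_contra hge
    have he : m.getD r [] = [] := List.getD_eq_default m [] (by omega)
    rw [he] at h
    simp at h
  refine ⟨h1, ?_⟩
  by_contra hge
  have he : (m.getD r []).getD c 0 = 0 := List.getD_eq_default _ 0 (by omega)
  omega

theorem getCell_setCell_self (m : List (List Int)) (r c : Nat) (v : Int)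
    (hr : r < m.length) (hc : c < (m.getD r []).length) :
    getCell (setCell m r c v) r c = v := by
  unfold getCell setCell
  rw [getD_set, if_pos ⟨rfl, hr⟩, getD_set, if_pos ⟨rfl, hc⟩]

-- pointwise value after one flip
theorem getCell_flip (m : List (List Int)) (r c : Nat) (h : getCell m r c < 0)
    (r' c' : Nat) :
    getCell (setCell m r c (-(getCell m r c))) r' c'
      = if r' = r ∧ c' = c then -(getCell m r c) else getCell m r' c' := by
  split_ifs with he
  · obtain ⟨h1, h2⟩ := he
    subst h1; subst h2
    exact getCell_setCell_self m r' c' _ (neg_inbounds m r' c' h).1 (neg_inbounds m r' c' h).2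
  · exact getCell_setCell_ne m r c _ r' c' he

-- characterization of A's neighbour fold over a duplicate-free cell list
theorem foldFlip_char (ns : List (Nat × Nat)) :
    ∀ (m : List (List Int)) (next : List (Nat × Nat)), ns.Nodup →
    (∀ r c, getCell ((ns.foldl flipFold (m, next)).1) r c
        = if ((r, c) ∈ ns ∧ getCell m r c < 0) then -(getCell m r c) else getCell m r c)
    ∧ ∃ L, (ns.foldl flipFold (m, next)).2 = next ++ L
        ∧ (∀ x : Nat × Nat, x ∈ L ↔ (x ∈ ns ∧ getCell m x.1 x.2 < 0)) := by
  induction ns with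
  | nil =>
    intro m next _
    exact ⟨fun r c => by simp, [], by simp, fun x => by simp⟩
  | cons n t ih =>
    intro m next hnd
    obtain ⟨hn, hnd'⟩ := List.nodup_cons.1 hnd
    rw [List.foldl_cons]
    by_cases hneg : getCell m n.1 n.2 < 0
    · have hstep : flipFold (m, next) n
          = (setCell m n.1 n.2 (-(getCell m n.1 n.2)), next ++ [n]) := by
        unfold flipFold; rw [if_pos hneg]
      rw [hstep]
      have hm1 := getCell_flip m n.1 n.2 hneg
      obtain ⟨ihv, L, hLeq, hLmem⟩ := ih (setCell m n.1 n.2 (-(getCell m n.1 n.2))) (next ++ [n]) hnd'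
      refine ⟨?_, n :: L, ?_, ?_⟩
      · intro r c
        rw [ihv r c]
        by_cases he : (r, c) = n
        · have hrc1 : r = n.1 := by rw [← he]
          have hrc2 : c = n.2 := by rw [← he]
          have hnot : (r, c) ∉ t := he ▸ hn
          rw [if_neg (fun hco => hnot hco.1), hm1 r c, if_pos ⟨hrc1, hrc2⟩,
            if_pos ⟨List.mem_cons.2 (Or.inl he), by rw [hrc1, hrc2]; exact hneg⟩]
          rw [hrc1, hrc2]
        · have hv1 : getCell (setCell m n.1 n.2 (-(getCell m n.1 n.2))) r c = getCell m r c := by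
            rw [hm1 r c, if_neg (fun hco => he (Prod.ext hco.1 hco.2))]
          rw [hv1]
          by_cases hmc : (r, c) ∈ t ∧ getCell m r c < 0
          · rw [if_pos hmc, if_pos ⟨List.mem_cons.2 (Or.inr hmc.1), hmc.2⟩]
          · rw [if_neg hmc, if_neg (fun hco =>
              hmc ⟨(List.mem_cons.1 hco.1).resolve_left he, hco.2⟩)]
      · rw [hLeq, List.append_assoc, List.singleton_append]
      · intro x
        rw [List.mem_cons, hLmem x]
        by_cases hx : x = n
        · subst hx
          have hnm1 : getCell (setCell m x.1 x.2 (-(getCell m x.1 x.2))) x.1 x.2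
              = -(getCell m x.1 x.2) := by rw [hm1 x.1 x.2, if_pos ⟨rfl, rfl⟩]
          constructor
          · intro _; exact ⟨List.mem_cons_self, hneg⟩
          · intro _; exact Or.inl rfl
        · have hv1 : getCell (setCell m n.1 n.2 (-(getCell m n.1 n.2))) x.1 x.2
              = getCell m x.1 x.2 := by
            rw [hm1 x.1 x.2, if_neg (fun hco => hx (Prod.ext hco.1 hco.2))]
          constructor
          · rintro (he | ⟨hxt, hnx⟩)
            · exact absurd he hx
            · exact ⟨List.mem_cons.2 (Or.inr hxt), by rwa [hv1] at hnx⟩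
          · rintro ⟨hmem, hnx⟩
            exact Or.inr ⟨(List.mem_cons.1 hmem).resolve_left hx, by rwa [hv1]⟩
    · have hstep : flipFold (m, next) n = (m, next) := by
        unfold flipFold; rw [if_neg hneg]
      rw [hstep]
      obtain ⟨ihv, L, hLeq, hLmem⟩ := ih m next hnd'
      refine ⟨?_, L, hLeq, ?_⟩
      · intro r c
        rw [ihv r c]
        by_cases hmc : (r, c) ∈ t ∧ getCell m r c < 0
        · rw [if_pos hmc, if_pos ⟨List.mem_cons.2 (Or.inr hmc.1), hmc.2⟩]
        · rw [if_neg hmc, if_neg (fun hco => hmc ⟨(List.mem_cons.1 hco.1).resolve_left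
            (fun he => hneg (by rw [← he]; exact hco.2)), hco.2⟩)]
      · intro x
        rw [hLmem x]
        constructor
        · rintro ⟨hxt, hnx⟩
          exact ⟨List.mem_cons.2 (Or.inr hxt), hnx⟩
        · rintro ⟨hmem, hnx⟩
          exact ⟨(List.mem_cons.1 hmem).resolve_left
            (fun he => hneg (by rw [← he]; exact hnx)), hnx⟩

-- full-shape preservation
theorem setCell_shape (m : List (List Int)) (r c : Nat) (v : Int) :
    (setCell m r c v).length = m.length
    ∧ ∀ r', ((setCell m r c v).getD r' []).length = (m.getD r' []).length := by
  refine ⟨List.length_set, fun r' => ?_⟩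
  unfold setCell
  rw [getD_set]
  split_ifs with h
  · rw [List.length_set, ← h.1]
  · rfl

theorem foldFlip_shape (ns : List (Nat × Nat)) :
    ∀ (m : List (List Int)) (next : List (Nat × Nat)),
    ((ns.foldl flipFold (m, next)).1.length = m.length
    ∧ ∀ r', (((ns.foldl flipFold (m, next)).1).getD r' []).length = ((m.getD r' []).length)) := by
  induction ns with
  | nil => intro m next; exact ⟨rfl, fun _ => rfl⟩
  | cons p t ih =>
    intro m next
    rw [List.foldl_cons]
    unfold flipFold
    split_ifs with h
    · obtain ⟨ih1, ih2⟩ := ih (setCell m p.1 p.2 (-(getCell m p.1 p.2))) (next ++ [p])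
      exact ⟨ih1.trans (setCell_shape m p.1 p.2 _).1,
        fun r' => (ih2 r').trans ((setCell_shape m p.1 p.2 _).2 r')⟩
    · exact ih m next

theorem flipAll_shape (S : List (Nat × Nat)) :
    ∀ (m : List (List Int)),
    ((flipAll m S).length = m.length
    ∧ ∀ r', (((flipAll m S).getD r' []).length = ((m.getD r' []).length))) := by
  induction S with
  | nil => intro m; exact ⟨rfl, fun _ => rfl⟩
  | cons x t ih =>
    intro m
    have hstep : flipAll m (x :: t) = flipAll (setCell m x.1 x.2 (-(getCell m x.1 x.2))) t := rfl
    rw [hstep]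
    obtain ⟨ih1, ih2⟩ := ih (setCell m x.1 x.2 (-(getCell m x.1 x.2)))
    exact ⟨ih1.trans (setCell_shape m x.1 x.2 _).1,
      fun r' => (ih2 r').trans ((setCell_shape m x.1 x.2 _).2 r')⟩

theorem get_neighbors_congr (m1 m2 : List (List Int)) (r c : Nat)
    (h1 : m1.length = m2.length) (h2 : (m1.headD []).length = (m2.headD []).length) :
    get_neighbors r c m1 = get_neighbors r c m2 := by
  simp only [get_neighbors, h1, h2]

theorem headD_eq_getD_zero (m : List (List Int)) : m.headD [] = m.getD 0 [] := by
  cases m <;> rfl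

theorem get_neighbors_nodup (r c : Nat) (m : List (List Int)) :
    (get_neighbors r c m).Nodup := by
  unfold get_neighbors
  split_ifs <;> simp [Prod.ext_iff] <;> omega

theorem innerA_cons (m : List (List Int)) (r c : Nat) (rest next : List (Nat × Nat)) :
    innerA m ((r, c) :: rest) next
      = innerA ((get_neighbors r c m).foldl flipFold (m, next)).1 rest
          ((get_neighbors r c m).foldl flipFold (m, next)).2 := by
  rw [innerA]

-- characterization of one whole pass of A (the inner while loop)
theorem innerA_char : ∀ (F : List (Nat × Nat)) (m : List (List Int)) (next : List (Nat × Nat)),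
    ((innerA m F next).1.length = m.length
    ∧ (∀ r', (((innerA m F next).1).getD r' []).length = ((m.getD r' []).length))
    ∧ (∀ r c, getCell (innerA m F next).1 r c
        = if (getCell m r c < 0 ∧ ∃ f ∈ F, (r, c) ∈ get_neighbors f.1 f.2 m)
          then -(getCell m r c) else getCell m r c)
    ∧ ∃ L, (innerA m F next).2 = next ++ L
        ∧ (∀ x : Nat × Nat, x ∈ L ↔ (getCell m x.1 x.2 < 0
            ∧ ∃ f ∈ F, x ∈ get_neighbors f.1 f.2 m))) := by
  intro F
  induction F with
  | nil =>
    intro m next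
    refine ⟨rfl, fun _ => rfl, fun r c => by simp [innerA], [], by simp [innerA], fun x => by simp⟩
  | cons f rest ih =>
    obtain ⟨r0, c0⟩ := f
    intro m next
    obtain ⟨hstv, L0, hL0eq, hL0mem⟩ :=
      foldFlip_char (get_neighbors r0 c0 m) m next (get_neighbors_nodup r0 c0 m)
    obtain ⟨hshl, hshr⟩ := foldFlip_shape (get_neighbors r0 c0 m) m next
    have hcong : ∀ a b : Nat,
        get_neighbors a b ((get_neighbors r0 c0 m).foldl flipFold (m, next)).1
          = get_neighbors a b m := by
      intro a b
      exact get_neighbors_congr _ _ a b hshl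
        (by rw [headD_eq_getD_zero, headD_eq_getD_zero]; exact hshr 0)
    obtain ⟨ihlen, ihrow, ihv, L1, hL1eq, hL1mem⟩ :=
      ih ((get_neighbors r0 c0 m).foldl flipFold (m, next)).1
        ((get_neighbors r0 c0 m).foldl flipFold (m, next)).2
    rw [innerA_cons]
    refine ⟨ihlen.trans hshl, fun r' => (ihrow r').trans (hshr r'), ?_, L0 ++ L1, ?_, ?_⟩
    · intro r c
      rw [ihv r c]
      simp only [hcong]
      by_cases hN : getCell m r c < 0
      · by_cases hA0 : (r, c) ∈ get_neighbors r0 c0 m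
        · have hstval : getCell ((get_neighbors r0 c0 m).foldl flipFold (m, next)).1 r c
              = -(getCell m r c) := by rw [hstv r c, if_pos ⟨hA0, hN⟩]
          rw [if_neg (fun hco => absurd hco.1 (by rw [hstval]; omega)), hstval,
            if_pos ⟨hN, ⟨(r0, c0), List.mem_cons_self, hA0⟩⟩]
        · have hstval : getCell ((get_neighbors r0 c0 m).foldl flipFold (m, next)).1 r c
              = getCell m r c := by rw [hstv r c, if_neg (fun hco => hA0 hco.1)]
          by_cases hR : ∃ f ∈ rest, (r, c) ∈ get_neighbors f.1 f.2 m
          · obtain ⟨f, hf, hfm⟩ := hR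
            rw [if_pos ⟨by rw [hstval]; exact hN, ⟨f, hf, hfm⟩⟩, hstval,
              if_pos ⟨hN, ⟨f, List.mem_cons_of_mem _ hf, hfm⟩⟩]
          · rw [if_neg (fun hco => hR hco.2), hstval, if_neg (fun hco => by
              rcases hco.2 with ⟨f, hfmem, hfm⟩
              rcases List.mem_cons.1 hfmem with he | hf
              · exact hA0 (by rw [he] at hfm; exact hfm)
              · exact hR ⟨f, hf, hfm⟩)]
      · have hstval : getCell ((get_neighbors r0 c0 m).foldl flipFold (m, next)).1 r c
            = getCell m r c := by rw [hstv r c, if_neg (fun hco => hN hco.2)]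
        rw [if_neg (fun hco => hN (by rw [← hstval]; exact hco.1)), hstval,
          if_neg (fun hco => hN hco.1)]
    · rw [hL1eq, hL0eq, List.append_assoc]
    · intro x
      rw [List.mem_append, hL0mem x, hL1mem x]
      simp only [hcong]
      have hstvx := hstv x.1 x.2
      constructor
      · rintro (⟨hA0x, hNx⟩ | ⟨hnegst, hRx⟩)
        · exact ⟨hNx, ⟨(r0, c0), List.mem_cons_self, hA0x⟩⟩
        · have hNx : getCell m x.1 x.2 < 0 := by
            by_cases hc : (x.1, x.2) ∈ get_neighbors r0 c0 m ∧ getCell m x.1 x.2 < 0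
            · exact hc.2
            · rwa [hstvx, if_neg hc] at hnegst
          obtain ⟨f, hf, hfm⟩ := hRx
          exact ⟨hNx, ⟨f, List.mem_cons_of_mem _ hf, hfm⟩⟩
      · rintro ⟨hNx, ⟨f, hfmem, hfm⟩⟩
        rcases List.mem_cons.1 hfmem with he | hf
        · exact Or.inl ⟨by rw [he] at hfm; exact hfm, hNx⟩
        · by_cases hA0x : (x.1, x.2) ∈ get_neighbors r0 c0 m
          · exact Or.inl ⟨hA0x, hNx⟩
          · refine Or.inr ⟨?_, ⟨f, hf, hfm⟩⟩
            rw [hstvx, if_neg (fun hco => hA0x hco.1)]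
            exact hNx

-- pointwise value of B's flip loop over a duplicate-free all-negative cell list
theorem flipAll_char (S : List (Nat × Nat)) :
    ∀ (m : List (List Int)), S.Nodup → (∀ x ∈ S, getCell m x.1 x.2 < 0) →
    ∀ r c, getCell (flipAll m S) r c
      = if (r, c) ∈ S then -(getCell m r c) else getCell m r c := by
  induction S with
  | nil => intro m _ _ r c; simp [flipAll]
  | cons x t ih =>
    intro m hnd hneg r c
    obtain ⟨hxn, hnd'⟩ := List.nodup_cons.1 hnd
    have hx := hneg x List.mem_cons_self
    have hstep : flipAll m (x :: t) = flipAll (setCell m x.1 x.2 (-(getCell m x.1 x.2))) t := rfl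
    rw [hstep]
    have hm1 := getCell_flip m x.1 x.2 hx
    have htail : ∀ y ∈ t, getCell (setCell m x.1 x.2 (-(getCell m x.1 x.2))) y.1 y.2 < 0 := by
      intro y hy
      rw [hm1 y.1 y.2, if_neg]
      · exact hneg y (List.mem_cons_of_mem _ hy)
      · rintro ⟨a, b⟩
        exact hxn ((Prod.ext a b : y = x) ▸ hy)
    rw [ih _ hnd' htail r c]
    by_cases he : (r, c) = x
    · have hrc1 : r = x.1 := by rw [← he]
      have hrc2 : c = x.2 := by rw [← he]
      have hnot : (r, c) ∉ t := he ▸ hxn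
      rw [if_neg hnot, hm1 r c, if_pos ⟨hrc1, hrc2⟩, if_pos (List.mem_cons.2 (Or.inl he))]
      rw [hrc1, hrc2]
    · by_cases hmem : (r, c) ∈ t
      · rw [if_pos hmem, if_pos (List.mem_cons.2 (Or.inr hmem)), hm1 r c,
          if_neg (fun hco => he (Prod.ext hco.1 hco.2))]
      · rw [if_neg hmem,
          if_neg (show ¬(r, c) ∈ x :: t from
            fun hco => hmem ((List.mem_cons.1 hco).resolve_left he)),
          hm1 r c, if_neg (fun hco => he (Prod.ext hco.1 hco.2))]

theorem matrix_ext (m1 m2 : List (List Int)) (hlen : m1.length = m2.length)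
    (hrow : ∀ r, (m1.getD r []).length = (m2.getD r []).length)
    (hcell : ∀ r c, getCell m1 r c = getCell m2 r c) : m1 = m2 := by
  apply List.ext_getElem hlen
  intro i h1 h2
  apply List.ext_getElem
  · have h := hrow i
    rwa [List.getD_eq_getElem _ _ h1, List.getD_eq_getElem _ _ h2] at h
  · intro j hj1 hj2
    have h := hcell i j
    unfold getCell at h
    rwa [List.getD_eq_getElem _ _ h1, List.getD_eq_getElem _ _ h2,
      List.getD_eq_getElem _ _ hj1, List.getD_eq_getElem _ _ hj2] at h

-- the BFS invariant carried along A's outer loop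
def BfsInv (rows width : Nat) (m : List (List Int)) (F : List (Nat × Nat)) : Prop :=
  (∀ f ∈ F, 0 < getCell m f.1 f.2 ∧ f.1 < rows ∧ f.2 < width)
  ∧ (∀ x : Nat × Nat, getCell m x.1 x.2 < 0 →
      (∃ y : Nat × Nat, Adj rows width x y ∧ 0 < getCell m y.1 y.2) →
      ∃ f ∈ F, Adj rows width f x)

-- under the invariant, A's pass flips exactly B's sweep set
theorem pass_corr (rows width : Nat) (m : List (List Int)) (F : List (Nat × Nat))
    (hr : m.length = rows) (hw : (m.headD []).length = width)
    (hinv : BfsInv rows width m F) :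
    (innerA m F []).1 = flipAll m (toFlip m rows width)
    ∧ (∀ x : Nat × Nat, x ∈ (innerA m F []).2 ↔ x ∈ toFlip m rows width) := by
  subst hr
  subst hw
  obtain ⟨hilen, hirow, hiv, L, hLeq, hLmem⟩ := innerA_char F m []
  have hcond : ∀ x : Nat × Nat,
      (getCell m x.1 x.2 < 0 ∧ ∃ f ∈ F, x ∈ get_neighbors f.1 f.2 m)
        ↔ x ∈ toFlip m m.length (m.headD []).length := by
    intro x
    rw [mem_toFlip]
    constructor
    · rintro ⟨hneg, f, hf, hnbr⟩
      obtain ⟨hfp, hf1, hf2⟩ := hinv.1 f hf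
      have hadj : Adj m.length (m.headD []).length f x :=
        (mem_get_neighbors m f x hf1 hf2).1 hnbr
      have hbnd := hadj
      obtain ⟨-, -, hx1, hx2, -⟩ := hbnd
      refine ⟨hx1, hx2, hneg, ?_⟩
      rw [show x = (x.1, x.2) from rfl] at hadj
      exact (hasPosNbr_iff m x.1 x.2 _ _ hx1 hx2).2
        ⟨f, Adj_symm _ _ _ _ hadj, hfp⟩
    · rintro ⟨hx1, hx2, hneg, hpn⟩
      obtain ⟨y, hady, hyp⟩ := (hasPosNbr_iff m x.1 x.2 _ _ hx1 hx2).1 hpn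
      obtain ⟨f, hfF, hadj⟩ := hinv.2 x hneg ⟨y, hady, hyp⟩
      refine ⟨hneg, f, hfF, ?_⟩
      rw [mem_get_neighbors m f x (hinv.1 f hfF).2.1 (hinv.1 f hfF).2.2]
      exact hadj
  constructor
  · apply matrix_ext
    · rw [hilen, (flipAll_shape _ m).1]
    · intro r'
      rw [hirow r', (flipAll_shape _ m).2 r']
    · intro r c
      rw [hiv r c, flipAll_char _ m (toFlip_nodup m _ _) (toFlip_neg m _ _) r c]
      by_cases hc : getCell m r c < 0 ∧ ∃ f ∈ F, (r, c) ∈ get_neighbors f.1 f.2 m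
      · rw [if_pos hc, if_pos ((hcond (r, c)).1 hc)]
      · rw [if_neg hc, if_neg (fun hmem => hc ((hcond (r, c)).2 hmem))]
  · intro x
    rw [hLeq, List.nil_append, hLmem x]
    exact hcond x

theorem main_corr : ∀ (n : Nat) (m : List (List Int)) (F : List (Nat × Nat)) (p : Int)
    (rows width : Nat), negCount m = n → m.length = rows → (m.headD []).length = width →
    F ≠ [] → BfsInv rows width m F →
    outerA m F p = loopB rows width m (p + 1) := by
  intro n
  induction n using Nat.strong_induction_on with
  | _ n ihn =>
    intro m F p rows width hn hr hw hF hinv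
    obtain ⟨f0, t, rfl⟩ : ∃ f0 t, F = f0 :: t := by
      cases F with
      | nil => exact absurd rfl hF
      | cons f0 t => exact ⟨f0, t, rfl⟩
    have houter : outerA m (f0 :: t) p
        = outerA (innerA m (f0 :: t) []).1 (innerA m (f0 :: t) []).2 (p + 1) := by
      rw [outerA]
    obtain ⟨hm1eq, hqmem⟩ := pass_corr rows width m (f0 :: t) hr hw hinv
    by_cases hS : toFlip m rows width = []
    · have hF' : (innerA m (f0 :: t) []).2 = [] := by
        rw [List.eq_nil_iff_forall_not_mem]
        intro x hx
        rw [hS] at hqmem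
        exact absurd ((hqmem x).1 hx) (List.not_mem_nil)
      rw [houter, hF', outerA, loopB, if_pos hS]
    · have hmeas := flipAll_measure (toFlip m rows width) m
        (toFlip_nodup m rows width) (toFlip_neg m rows width)
      have hSlen : 0 < (toFlip m rows width).length := List.length_pos_of_ne_nil hS
      have hlt : negCount (flipAll m (toFlip m rows width)) < n := by omega
      have hF' : (innerA m (f0 :: t) []).2 ≠ [] := by
        obtain ⟨x, hx⟩ := List.exists_mem_of_ne_nil _ hS
        exact List.ne_nil_of_mem ((hqmem x).2 hx)
      have hchar := flipAll_char (toFlip m rows width) m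
        (toFlip_nodup m rows width) (toFlip_neg m rows width)
      have hinv' : BfsInv rows width (flipAll m (toFlip m rows width))
          (innerA m (f0 :: t) []).2 := by
        constructor
        · intro f hf
          have hfS := (hqmem f).1 hf
          obtain ⟨hf1, hf2, hfneg, -⟩ := (mem_toFlip m rows width f).1 hfS
          refine ⟨?_, hf1, hf2⟩
          rw [show f = (f.1, f.2) from rfl] at hfS
          rw [hchar f.1 f.2, if_pos hfS]
          omega
        · rintro ⟨x1, x2⟩ hnegx ⟨y, hadj, hposy⟩
          have hxS : (x1, x2) ∉ toFlip m rows width := by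
            intro hmem
            rw [hchar x1 x2, if_pos hmem] at hnegx
            have := toFlip_neg m rows width _ hmem
            simp only at this
            omega
          have hnegm : getCell m x1 x2 < 0 := by
            rwa [hchar x1 x2, if_neg hxS] at hnegx
          by_cases hyS : (y.1, y.2) ∈ toFlip m rows width
          · refine ⟨y, (hqmem y).2 (by rwa [show (y.1, y.2) = y from rfl] at hyS),
              Adj_symm _ _ _ _ hadj⟩
          · have hposy' : 0 < getCell m y.1 y.2 := by
              rwa [hchar y.1 y.2, if_neg hyS] at hposy
            obtain ⟨f, hfF, hadjf⟩ := hinv.2 (x1, x2) hnegm ⟨y, hadj, hposy'⟩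
            exfalso
            apply hxS
            rw [mem_toFlip]
            obtain ⟨hfp, hf1, hf2⟩ := hinv.1 f hfF
            have hbnd := hadjf
            obtain ⟨-, -, hx1, hx2, -⟩ := hbnd
            exact ⟨hx1, hx2, hnegm, (hasPosNbr_iff m x1 x2 _ _ hx1 hx2).2
              ⟨f, Adj_symm _ _ _ _ hadjf, hfp⟩⟩
      have hlen' : (flipAll m (toFlip m rows width)).length = rows := by
        rw [(flipAll_shape _ m).1, hr]
      have hw' : ((flipAll m (toFlip m rows width)).headD []).length = width := by
        rw [headD_eq_getD_zero, (flipAll_shape _ m).2 0, ← headD_eq_getD_zero, hw]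
      have hrec := ihn (negCount (flipAll m (toFlip m rows width))) hlt
        (flipAll m (toFlip m rows width)) (innerA m (f0 :: t) []).2 (p + 1)
        rows width rfl hlen' hw' hF' hinv'
      rw [houter, hm1eq, hrec]
      conv_rhs => rw [loopB]
      rw [if_neg hS]

-- seed characterization (reused flattening of A's nested positive scan)
theorem inner_fold_pos (m : List (List Int)) (r : Nat) :
    ∀ (l : List Nat) (acc : List (Nat × Nat)),
    l.foldl (fun acc2 c => if getCell m r c > 0 then acc2 ++ [(r, c)] else acc2) acc
      = acc ++ (l.filter (fun c => getCell m r c > 0)).map (fun c => (r, c)) := by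
  intro l
  induction l with
  | nil => intro acc; simp
  | cons x xs ih =>
    intro acc
    rw [List.foldl_cons, List.filter_cons]
    by_cases hx : getCell m r x > 0
    · rw [if_pos hx, ih]
      simp [hx]
    · rw [if_neg hx, ih]
      simp [hx]

theorem gapp_mem (m : List (List Int)) (x : Nat × Nat) :
    x ∈ get_all_positive_positions m ↔
      x.1 < m.length ∧ x.2 < (m.headD []).length ∧ 0 < getCell m x.1 x.2 := by
  obtain ⟨r, c⟩ := x
  unfold get_all_positive_positions
  simp only [inner_fold_pos]
  rw [PySem.List.foldl_append_eq_flatMap, List.nil_append]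
  simp only [List.mem_flatMap, List.mem_map, List.mem_filter, List.mem_range,
    decide_eq_true_eq, Prod.mk.injEq]
  constructor
  · rintro ⟨r', hr', c', ⟨hc', hp⟩, rfl, rfl⟩
    exact ⟨hr', hc', hp⟩
  · rintro ⟨hr, hc, hp⟩
    exact ⟨r, hr, c, ⟨hc, hp⟩, rfl, rfl⟩

-- ===== VERDICT (by name: the statement is the Claim_ definition above) =====
theorem convert_negatives_spec : Claim_equal_convert_negatives := by
  intro matrix _ _
  unfold Spec_convert_negatives convert_negatives convert_negatives_alt
  simp only
  by_cases hseeds : get_all_positive_positions matrix = []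
  · rw [hseeds, outerA, if_neg]
    intro hany
    simp only [List.any_eq_true, List.mem_range, decide_eq_true_eq] at hany
    obtain ⟨r, hr, c, hc, hpos⟩ := hany
    have : (r, c) ∈ get_all_positive_positions matrix :=
      (gapp_mem matrix (r, c)).2 ⟨hr, hc, hpos⟩
    rw [hseeds] at this
    exact List.not_mem_nil this
  · have hany : ((List.range matrix.length).any (fun r =>
        (List.range (matrix.headD []).length).any (fun c =>
          decide (0 < getCell matrix r c)))) = true := by
      obtain ⟨x, hx⟩ := List.exists_mem_of_ne_nil _ hseeds
      obtain ⟨hx1, hx2, hxp⟩ := (gapp_mem matrix x).1 hx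
      simp only [List.any_eq_true, List.mem_range, decide_eq_true_eq]
      exact ⟨x.1, hx1, x.2, hx2, hxp⟩
    rw [if_pos hany]
    have hinv0 : BfsInv matrix.length (matrix.headD []).length matrix
        (get_all_positive_positions matrix) := by
      constructor
      · intro f hf
        obtain ⟨h1, h2, h3⟩ := (gapp_mem matrix f).1 hf
        exact ⟨h3, h1, h2⟩
      · rintro x hneg ⟨y, hadj, hpos⟩
        have hbnd := hadj
        obtain ⟨-, -, hy1, hy2, -⟩ := hbnd
        exact ⟨y, (gapp_mem matrix y).2 ⟨hy1, hy2, hpos⟩, Adj_symm _ _ _ _ hadj⟩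
    have := main_corr (negCount matrix) matrix (get_all_positive_positions matrix)
      (-1) matrix.length (matrix.headD []).length rfl rfl rfl hseeds hinv0
    rw [this]
    norm_num
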